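-- pv_equiv track=rewrite | github.com/nashisandesu/MyAtCoder | ARC/arc174/arc174_a.py | max_sum_after_operation
-- ===== SOURCE A (Python) =====
-- def max_sum_after_operation(A, C, N):
--     initial_sum = sum(A)
--
--     max_diff = 0
--     current_diff = 0
--
--     for i in range(N):
--         current_diff += (A[i] * C - A[i])
--
--         if current_diff < 0:
--             current_diff = 0
--
--         max_diff = max(max_diff, current_diff)
--
--     final_max_sum = initial_sum + max_diff
--     return final_max_sum
-- ===== SOURCE B (Python) =====
-- def max_sum_after_operation(A, C, N):
--     # pass 1: explicit prefix-sum table of the gains A[i]*C - A[i]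
--     P = []
--     s = 0
--     for i in range(N):
--         s += A[i] * C - A[i]
--         P.append(s)
--     # pass 2: best subarray gain = max over p in P of p - (minimum prefix seen before it)
--     best = 0
--     mn = 0
--     for p in P:
--         if p - mn > best:
--             best = p - mn
--         if p < mn:
--             mn = p
--     return sum(A) + best
-- ===== Notes on version B (the rewrite author's own statement) =====
-- stated objective: alternative
-- what changed: Replaces Kadane's reset-to-zero running sum with a two-pass prefix-sum formulation: B first builds the explicit prefix-sum table of the gains A[i]*C - A[i], then scans it keeping the running minimum prefix, taking the best P[j] - min_prefix as the maximal subarray gain.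
import Mathlib
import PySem

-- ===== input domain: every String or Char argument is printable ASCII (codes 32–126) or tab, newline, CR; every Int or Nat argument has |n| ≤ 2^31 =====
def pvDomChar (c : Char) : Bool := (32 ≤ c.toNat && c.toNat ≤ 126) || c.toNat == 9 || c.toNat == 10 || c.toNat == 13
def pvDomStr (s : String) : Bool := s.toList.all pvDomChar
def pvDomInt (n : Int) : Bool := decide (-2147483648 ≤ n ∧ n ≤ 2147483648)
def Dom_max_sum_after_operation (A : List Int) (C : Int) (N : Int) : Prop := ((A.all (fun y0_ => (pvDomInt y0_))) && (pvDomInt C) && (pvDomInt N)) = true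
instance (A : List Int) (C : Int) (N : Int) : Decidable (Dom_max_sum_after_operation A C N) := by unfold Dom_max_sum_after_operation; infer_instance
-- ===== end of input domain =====

-- B replaces Kadane's reset-to-zero scan with a two-pass prefix-sum table plus
-- running-minimum scan over the gains a*C - a (objective: alternative decomposition, same O(n) cost).

-- ===== PORT A =====
-- loop body of A's Kadane scan: state (max_diff, current_diff), element A[i]
def pvStepA (C : Int) (s : Int × Int) (a : Int) : Int × Int :=
  let cd := s.2 + (a * C - a)
  let cd := if cd < 0 then 0 else cd
  (max s.1 cd, cd)

def max_sum_after_operation (A : List Int) (C : Int) (N : Int) : Int :=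
  let initial_sum := A.sum
  let st := (PySem.List.pyRange 0 N).foldl
    (fun s i => pvStepA C s (PySem.List.pyGetD A i 0)) (0, 0)
  -- pyGetD with default 0 stands for A[i]; Pre_ guarantees i is in range (else Python raises IndexError)
  initial_sum + st.1

-- ===== PORT B =====
-- body of B's first pass: state (P, s) — the prefix-sum table built so far and the running sum
def pvBuildStep (C : Int) (st : List Int × Int) (a : Int) : List Int × Int :=
  let s := st.2 + (a * C - a)
  (st.1 ++ [s], s)

-- body of B's second pass: state (best, mn), element p (a prefix sum)
def pvScanStep (st : Int × Int) (p : Int) : Int × Int :=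
  (if p - st.2 > st.1 then p - st.2 else st.1,
   if p < st.2 then p else st.2)

def max_sum_after_operation_alt (A : List Int) (C : Int) (N : Int) : Int :=
  let P := ((PySem.List.pyRange 0 N).foldl
    (fun st i => pvBuildStep C st (PySem.List.pyGetD A i 0)) ([], 0)).1
  let st := P.foldl pvScanStep (0, 0)
  A.sum + st.1

-- ===== PRECONDITION & SPEC =====
-- Pre_ excludes exactly N > len(A), where A's indexing A[i] raises IndexError.
def Pre_max_sum_after_operation (A : List Int) (C : Int) (N : Int) : Prop :=
  N ≤ A.length
instance (A : List Int) (C : Int) (N : Int) : Decidable (Pre_max_sum_after_operation A C N) := by unfold Pre_max_sum_after_operation; infer_instance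

def pvWitness_max_sum_after_operation : List Int × Int × Int := ([3, -1, 4], 2, 3)

def Spec_max_sum_after_operation (A : List Int) (C : Int) (N : Int) (out : Int) : Prop := out = max_sum_after_operation_alt A C N
instance (A : List Int) (C : Int) (N : Int) (out : Int) : Decidable (Spec_max_sum_after_operation A C N out) := by unfold Spec_max_sum_after_operation; infer_instance

-- ===== CLAIM (what is proved, stated in full; the proofs are below) =====
def Claim_equal_max_sum_after_operation : Prop := ∀ (A : List Int) (C : Int) (N : Int), Dom_max_sum_after_operation A C N → Pre_max_sum_after_operation A C N → Spec_max_sum_after_operation A C N (max_sum_after_operation A C N)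

-- ===== LEMMAS AND PROOFS =====

-- An index loop over range(n), n ≤ len(A), reading A[i], is the element fold over A.take n.
theorem pvFold_range {σ : Type} (A : List Int) (f : σ → Int → σ) (n : Nat)
    (hn : n ≤ A.length) (s : σ) :
    (PySem.List.pyRange 0 (n : Int)).foldl
      (fun s i => f s (PySem.List.pyGetD A i 0)) s
    = (A.take n).foldl f s := by
  induction n generalizing s with
  | zero => simp [PySem.List.pyRange]
  | succ m ih =>
    have hcast : ((m + 1 : Nat) : Int) = (m : Int) + 1 := by push_cast; ring
    rw [hcast, PySem.List.pyRange_one_succ_right (by positivity), List.foldl_append,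
        ih (by omega), List.take_add_one, List.foldl_append]
    have hm : m < A.length := by omega
    simp [PySem.List.pyGetD_natCast, List.getD, hm]

-- the prefix-sum table of the gains of L starting from running sum s
def pvPrefixes (C : Int) (s : Int) : List Int → List Int
  | [] => []
  | a :: L => (s + (a * C - a)) :: pvPrefixes C (s + (a * C - a)) L

-- B's first pass produces exactly the prefix-sum table.
theorem pvBuild_fst (C : Int) (L : List Int) (ps : List Int) (s : Int) :
    (L.foldl (pvBuildStep C) (ps, s)).1 = ps ++ pvPrefixes C s L := by
  induction L generalizing ps s with
  | nil => simp [pvPrefixes]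
  | cons a L ih => simp [pvBuildStep, pvPrefixes, ih, List.append_assoc]

-- Invariant tying Kadane's state (max_diff, current_diff) to the prefix-table scan state (best, mn).
theorem pvInvariant (C : Int) (L : List Int) (maxd cur s best mn : Int)
    (h1 : best = maxd) (h2 : cur = s - mn) (h3 : 0 ≤ maxd) (h4 : mn ≤ s) :
    (L.foldl (pvStepA C) (maxd, cur)).1 = ((pvPrefixes C s L).foldl pvScanStep (best, mn)).1 := by
  induction L generalizing maxd cur s best mn with
  | nil => simpa [pvPrefixes] using h1.symm
  | cons a L ih =>
    simp only [pvPrefixes, List.foldl_cons, pvStepA, pvScanStep]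
    by_cases hneg : cur + (a * C - a) < 0
    · rw [if_pos (by omega), if_neg (by omega), if_pos (by omega)]
      exact ih _ _ _ _ _ (by omega) (by omega) (by omega) (by omega)
    · rw [if_neg (by omega)]
      by_cases hbig : s + (a * C - a) - mn > best
      · rw [if_pos (by omega), if_neg (by omega)]
        exact ih _ _ _ _ _ (by omega) (by omega) (by omega) (by omega)
      · rw [if_neg (by omega), if_neg (by omega)]
        exact ih _ _ _ _ _ (by omega) (by omega) (by omega) (by omega)

-- ===== VERDICT (by name: the statement is the Claim_ definition above) =====
theorem max_sum_after_operation_spec : Claim_equal_max_sum_after_operation := by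
  intro A C N _ hpre
  unfold Spec_max_sum_after_operation max_sum_after_operation max_sum_after_operation_alt
  simp only
  by_cases hN0 : 0 ≤ N
  · have hNnat : ((N.toNat : Nat) : Int) = N := Int.toNat_of_nonneg hN0
    rw [← hNnat,
        pvFold_range A (pvStepA C) N.toNat (by unfold Pre_max_sum_after_operation at hpre; omega),
        pvFold_range A (pvBuildStep C) N.toNat (by unfold Pre_max_sum_after_operation at hpre; omega),
        pvBuild_fst]
    congr 1
    simpa using pvInvariant C (A.take N.toNat) 0 0 0 0 0 rfl (by ring) le_rfl le_rfl
  · -- negative N: range(N) is empty on both sides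
    have : PySem.List.pyRange 0 N = [] := by
      simp [PySem.List.pyRange]; omega
    simp [this]
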